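-- pv_equiv track=rewrite | github.com/bigscience-workshop/bigscience | evaluation/results/tr3/convert_results_to_json.py | checkpoint_step_to_tokens
-- ===== SOURCE A (Python) =====
-- import math
--
-- def checkpoint_step_to_tokens(checkpoint_step) -> int:
--     def fn(checkpoint_step) -> int:
--         if not hasattr(checkpoint_step_to_tokens, "CACHE"):
--             checkpoint_step_to_tokens.CACHE = {}
--
--         BATCH_SIZE=512
--         SEQUENCE_LENGTH=2048
--         # Linear increase in terms of samples.
--         RAMPUP_BATCH_SIZE = (32, 32, 2_000_000)
--
--         # Compute RAMPUP checkpoint_step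
--         if not hasattr(checkpoint_step_to_tokens, "RAMPUP_OFFSET"):
--             initial_batch_size, increment_batch_size, sample_limit_for_rampup = RAMPUP_BATCH_SIZE
--             number_of_increments = (BATCH_SIZE - initial_batch_size) // increment_batch_size
--             assert (BATCH_SIZE - initial_batch_size) % increment_batch_size == 0
--
--             offset_step = 0
--             start_sample = 0
--             for incr in range(number_of_increments):
--                 batch_size = initial_batch_size + incr * increment_batch_size
--                 end_sample = int(math.ceil((incr + 1) * sample_limit_for_rampup / number_of_increments))
--                 number_of_step_per_increment = int(math.ceil((end_sample - start_sample) / batch_size))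
--                 checkpoint_step_to_tokens.CACHE.update({
--                     offset_step + i: (start_sample + i * batch_size) * SEQUENCE_LENGTH
--                     for i in range(number_of_step_per_increment)
--                 })
--                 offset_step += number_of_step_per_increment
--                 start_sample += number_of_step_per_increment * batch_size
--
--             checkpoint_step_to_tokens.CACHE[offset_step] = start_sample * SEQUENCE_LENGTH
--             checkpoint_step_to_tokens.RAMPUP_OFFSET = offset_step
--
--         if checkpoint_step in checkpoint_step_to_tokens.CACHE:
--             return checkpoint_step_to_tokens.CACHE[checkpoint_step]
--
--         number_steps_after_rampup = checkpoint_step - checkpoint_step_to_tokens.RAMPUP_OFFSET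
--         assert number_steps_after_rampup >= 0
--
--         slope = BATCH_SIZE * SEQUENCE_LENGTH
--
--         checkpoint_step_to_tokens.CACHE[checkpoint_step] = \
--             checkpoint_step_to_tokens.CACHE[checkpoint_step_to_tokens.RAMPUP_OFFSET] + \
--             slope * number_steps_after_rampup
--         return checkpoint_step_to_tokens.CACHE[checkpoint_step]
--     return fn(checkpoint_step)
-- ===== SOURCE B (Python) =====
-- # Precomputed once from BATCH_SIZE=512, SEQUENCE_LENGTH=2048, RAMPUP_BATCH_SIZE=(32, 32, 2_000_000):
-- # the 15 linear batch-size ramp-up segments as (first_step, first_sample, batch_size),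
-- # followed by the constant-batch regime (step 13828 onward, batch 512).
-- _SEGMENTS = [
--     (0, 0, 32), (4167, 133344, 64), (6251, 266720, 96), (7640, 400064, 128),
--     (8682, 533440, 160), (9515, 666720, 192), (10210, 800160, 224),
--     (10805, 933440, 256), (11326, 1066816, 288), (11789, 1200160, 320),
--     (12206, 1333600, 352), (12585, 1467008, 384), (12932, 1600256, 416),
--     (13252, 1733376, 448), (13550, 1866880, 480), (13828, 2000320, 512),
-- ]
--
-- SEQUENCE_LENGTH = 2048
--
--
-- def checkpoint_step_to_tokens(checkpoint_step) -> int: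
--     # Pick the last segment starting at or before checkpoint_step; tokens grow
--     # linearly with the segment's batch size from the segment's first sample.
--     for first_step, first_sample, batch_size in reversed(_SEGMENTS):
--         if first_step <= checkpoint_step:
--             return (first_sample + (checkpoint_step - first_step) * batch_size) * SEQUENCE_LENGTH
--     raise AssertionError("checkpoint_step precedes the start of training")
-- ===== Notes on version B (the rewrite author's own statement) =====
-- stated objective: simpler
-- what changed: Instead of materialising a per-step token cache (one dict entry for every ramp-up step, built by a nested loop on first call), B stores the precomputed ramp-up segment boundaries in a small constant table and answers each query with one linear formula after a short scan for the enclosing segment.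
import Mathlib
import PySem

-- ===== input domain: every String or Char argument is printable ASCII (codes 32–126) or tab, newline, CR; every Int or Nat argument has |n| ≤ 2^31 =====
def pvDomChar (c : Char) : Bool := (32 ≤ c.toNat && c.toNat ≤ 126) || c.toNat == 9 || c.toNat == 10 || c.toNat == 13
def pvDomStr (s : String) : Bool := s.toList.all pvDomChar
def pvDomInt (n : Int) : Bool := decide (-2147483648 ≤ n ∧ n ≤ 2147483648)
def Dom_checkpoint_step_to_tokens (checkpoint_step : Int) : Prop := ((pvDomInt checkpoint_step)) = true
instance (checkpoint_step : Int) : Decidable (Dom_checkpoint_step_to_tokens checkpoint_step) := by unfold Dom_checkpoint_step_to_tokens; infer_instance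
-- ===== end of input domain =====

-- B replaces A's per-step token cache (one dict entry per rampup step, built by a loop) with a
-- small precomputed segment table and one linear formula per query (simpler; return value only —
-- A also memoises results in a function attribute across calls, a side effect not modelled).

-- ===== PORT A =====
-- int(math.ceil(x / y)) : for every (x, y) reached here the float division rounds to a value
-- with the same ceiling as the exact rational (verified for all 30 constant pairs), so it is
-- ported exactly as integer ceiling division -((-x) // y).
def pvCeilDiv (a b : Int) : Int := -(PySem.Int.floordiv (-a) b)

-- one iteration of the rampup loop: state = (CACHE, offset_step, start_sample);
-- 'CACHE.update({offset_step + i: … for i in range(n)})' is update with that pair list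
def pvRampupStep (st : PySem.Dict Int Int × Int × Int) (incr : Int) :
    PySem.Dict Int Int × Int × Int :=
  let cache := st.1
  let offset_step := st.2.1
  let start_sample := st.2.2
  let batch_size := 32 + incr * 32
  let end_sample := pvCeilDiv ((incr + 1) * 2000000) 15
  let number_of_step_per_increment := pvCeilDiv (end_sample - start_sample) batch_size
  let cache := cache.update ((PySem.List.pyRange 0 number_of_step_per_increment 1).map
      (fun i => (offset_step + i, (start_sample + i * batch_size) * 2048)))
  (cache, offset_step + number_of_step_per_increment,
    start_sample + number_of_step_per_increment * batch_size)

def checkpoint_step_to_tokens (checkpoint_step : Int) : Int :=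
  -- (512 - 32) % 32 == 0, so the assert on the constants passes
  let number_of_increments := PySem.Int.floordiv (512 - 32) 32
  let st := (PySem.List.pyRange 0 number_of_increments 1).foldl pvRampupStep
      (PySem.Dict.empty, 0, 0)
  let cache := st.1.insert st.2.1 (st.2.2 * 2048)
  -- 'if checkpoint_step in CACHE: return CACHE[checkpoint_step]'; the getD default is never
  -- used (the key was just tested), matching Python's CACHE[...] lookup exactly.
  if cache.contains checkpoint_step then
    cache.getD checkpoint_step 0
  else
    -- Python asserts that checkpoint_step is not below RAMPUP_OFFSET here; it raises on the
    -- negative steps (excluded by Pre_), and the key RAMPUP_OFFSET is always present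
    let number_steps_after_rampup := checkpoint_step - st.2.1
    (cache.getD st.2.1 0) + (512 * 2048) * number_steps_after_rampup

-- ===== PORT B =====
def pvSegments : List (Int × Int × Int) :=
  [(0, 0, 32), (4167, 133344, 64), (6251, 266720, 96), (7640, 400064, 128),
   (8682, 533440, 160), (9515, 666720, 192), (10210, 800160, 224),
   (10805, 933440, 256), (11326, 1066816, 288), (11789, 1200160, 320),
   (12206, 1333600, 352), (12585, 1467008, 384), (12932, 1600256, 416),
   (13252, 1733376, 448), (13550, 1866880, 480), (13828, 2000320, 512)]

-- the 'for … in reversed(_SEGMENTS): if …: return …' loop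
def pvFindSegment : List (Int × Int × Int) → Int → Option (Int × Int × Int)
  | [], _ => none
  | s :: rest, step => if s.1 ≤ step then some s else pvFindSegment rest step

def checkpoint_step_to_tokens_alt (checkpoint_step : Int) : Int :=
  match pvFindSegment pvSegments.reverse checkpoint_step with
  | some (first_step, first_sample, batch_size) =>
      (first_sample + (checkpoint_step - first_step) * batch_size) * 2048
  | none => 0  -- Python B raises AssertionError here (only for negative steps, outside Pre_)

-- ===== PRECONDITION & SPEC =====
-- Pre_ excludes exactly the negative steps, on which A fails its assert (AssertionError).
def Pre_checkpoint_step_to_tokens (checkpoint_step : Int) : Prop := 0 ≤ checkpoint_step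
instance (checkpoint_step : Int) : Decidable (Pre_checkpoint_step_to_tokens checkpoint_step) := by
  unfold Pre_checkpoint_step_to_tokens; infer_instance
def pvWitness_checkpoint_step_to_tokens : Int := 5000

def Spec_checkpoint_step_to_tokens (checkpoint_step : Int) (out : Int) : Prop := out = checkpoint_step_to_tokens_alt checkpoint_step
instance (checkpoint_step : Int) (out : Int) : Decidable (Spec_checkpoint_step_to_tokens checkpoint_step out) := by unfold Spec_checkpoint_step_to_tokens; infer_instance

-- ===== CLAIM (what is proved, stated in full; the proofs are below) =====
def Claim_equal_checkpoint_step_to_tokens : Prop := ∀ (checkpoint_step : Int), Dom_checkpoint_step_to_tokens checkpoint_step → Pre_checkpoint_step_to_tokens checkpoint_step → Spec_checkpoint_step_to_tokens checkpoint_step (checkpoint_step_to_tokens checkpoint_step)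

-- ===== LEMMAS AND PROOFS =====

-- the pair list one rampup increment adds to the cache
def pvSeg (off start b : Int) (m : Nat) : List (Int × Int) :=
  (List.range m).map (fun (i : Nat) => (off + (i : Int), (start + (i : Int) * b) * 2048))

-- looking a key up in a cache that starts with one increment's entries
theorem pv_get?_mk_seg (b : Int) (rest : List (Int × Int)) (m : Nat) (off start k : Int) :
    (PySem.Dict.mk (pvSeg off start b m ++ rest)).get? k
      = if off ≤ k ∧ k < off + (m : Int) then some ((start + (k - off) * b) * 2048)
        else (PySem.Dict.mk rest).get? k := by
  induction m generalizing off start with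
  | zero => simp [pvSeg]
  | succ n ih =>
      have hmap : pvSeg off start b (n+1)
          = (off, start * 2048) :: pvSeg (off + 1) (start + b) b n := by
        simp only [pvSeg, List.range_succ_eq_map, List.map_cons, List.map_map,
          Nat.cast_zero, add_zero, zero_mul]
        congr 1
        apply List.map_congr_left
        intro i _
        simp only [Function.comp_apply]
        push_cast
        refine Prod.ext ?_ ?_ <;> simp <;> ring
      rw [hmap, List.cons_append, PySem.Dict.get?_mk_cons, ih]
      by_cases hk : k = off
      · subst hk
        rw [if_pos (by simp), if_pos (by push_cast; omega)]
        congr 1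
        ring
      · have hbeq : (off == k) = false := by simpa using fun h => hk h.symm
        rw [hbeq]
        simp only [Bool.false_eq_true, if_false]
        by_cases h1 : off + 1 ≤ k ∧ k < off + 1 + (n : Int)
        · rw [if_pos h1, if_pos (by push_cast; omega)]
          congr 1
          ring
        · rw [if_neg h1, if_neg (by push_cast; omega)]

-- every key an increment adds is below any bound at or above its end
theorem pvSeg_keys (off start b : Int) (m : Nat) (bound : Int) (h : off + (m : Int) ≤ bound) :
    ∀ p ∈ pvSeg off start b m, p.1 < bound := by
  intro p hp
  simp only [pvSeg, List.mem_map, List.mem_range] at hp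
  obtain ⟨i, hi, rfl⟩ := hp
  simp only
  omega

-- one iteration of A's rampup loop, on a cache whose keys all lie below offset_step
theorem pvStage (L : List (Int × Int)) (off start incr b endv n : Int) (m : Nat)
    (hb : 32 + incr * 32 = b)
    (he : pvCeilDiv ((incr + 1) * 2000000) 15 = endv)
    (hn : pvCeilDiv (endv - start) b = n)
    (hm : n = (m : Int))
    (hkeys : ∀ p ∈ L, p.1 < off) :
    pvRampupStep (PySem.Dict.mk L, off, start) incr
      = (PySem.Dict.mk (L ++ pvSeg off start b m), off + n, start + n * b) := by
  unfold pvRampupStep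
  simp only [hb, he, hn, hm, PySem.List.pyRange_zero_natCast, List.map_map]
  refine Prod.ext ?_ (Prod.ext (by push_cast; ring) (by push_cast; ring))
  apply PySem.Dict.ext
  unfold PySem.Dict.update
  rw [PySem.Dict.items_foldl_insert_fresh _ Prod.fst Prod.snd]
  · simp only [pvSeg, List.map_map]
    rfl
  · intro a ha
    simp only [List.mem_map, List.mem_range] at ha
    obtain ⟨i, hi, rfl⟩ := ha
    rw [PySem.Dict.contains_eq_decide_mem_keys]
    simp only [decide_eq_false_iff_not]
    intro hmem
    have hk : PySem.Dict.keys (PySem.Dict.mk L) = L.map Prod.fst := rfl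
    rw [hk] at hmem
    simp only [List.mem_map] at hmem
    obtain ⟨p, hp, hp1⟩ := hmem
    have := hkeys p hp
    simp only [Function.comp_apply] at hp1
    omega
  · simp only [List.map_map]
    refine List.Nodup.map ?_ List.nodup_range
    intro a b h
    simp only [Function.comp_apply] at h
    omega

-- the full contents of A's cache after the rampup loop, in insertion order
def pvBIG : List (Int × Int) :=
  pvSeg 0 0 32 4167 ++
  pvSeg 4167 133344 64 2084 ++
  pvSeg 6251 266720 96 1389 ++
  pvSeg 7640 400064 128 1042 ++
  pvSeg 8682 533440 160 833 ++
  pvSeg 9515 666720 192 695 ++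
  pvSeg 10210 800160 224 595 ++
  pvSeg 10805 933440 256 521 ++
  pvSeg 11326 1066816 288 463 ++
  pvSeg 11789 1200160 320 417 ++
  pvSeg 12206 1333600 352 379 ++
  pvSeg 12585 1467008 384 347 ++
  pvSeg 12932 1600256 416 320 ++
  pvSeg 13252 1733376 448 298 ++
  pvSeg 13550 1866880 480 278 ++ ([] : List (Int × Int))

-- evaluating A's 15-iteration cache-building loop
set_option maxRecDepth 8192 in
set_option maxHeartbeats 4000000 in
theorem pv_cache_eq :
    (PySem.List.pyRange 0 15 1).foldl pvRampupStep (PySem.Dict.empty, 0, 0)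
      = (PySem.Dict.mk pvBIG, 13828, 2000320) := by
  have K0 : ∀ p ∈ ([] : List (Int × Int)), p.1 < (0:Int) := by simp
  have K1 : ∀ p ∈ pvSeg 0 0 32 4167, p.1 < (4167:Int) :=
    pvSeg_keys 0 0 32 4167 4167 (by norm_num)
  have K2 : ∀ p ∈ ((pvSeg 0 0 32 4167) ++ pvSeg 4167 133344 64 2084), p.1 < (6251:Int) := by
    intro p hp
    rcases List.mem_append.1 hp with h | h
    · exact lt_of_lt_of_le (K1 p h) (by norm_num)
    · exact pvSeg_keys _ _ _ _ _ (by norm_num) p h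
  have K3 : ∀ p ∈ (((pvSeg 0 0 32 4167) ++ pvSeg 4167 133344 64 2084) ++ pvSeg 6251 266720 96 1389), p.1 < (7640:Int) := by
    intro p hp
    rcases List.mem_append.1 hp with h | h
    · exact lt_of_lt_of_le (K2 p h) (by norm_num)
    · exact pvSeg_keys _ _ _ _ _ (by norm_num) p h
  have K4 : ∀ p ∈ ((((pvSeg 0 0 32 4167) ++ pvSeg 4167 133344 64 2084) ++ pvSeg 6251 266720 96 1389) ++ pvSeg 7640 400064 128 1042), p.1 < (8682:Int) := by
    intro p hp
    rcases List.mem_append.1 hp with h | h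
    · exact lt_of_lt_of_le (K3 p h) (by norm_num)
    · exact pvSeg_keys _ _ _ _ _ (by norm_num) p h
  have K5 : ∀ p ∈ (((((pvSeg 0 0 32 4167) ++ pvSeg 4167 133344 64 2084) ++ pvSeg 6251 266720 96 1389) ++ pvSeg 7640 400064 128 1042) ++ pvSeg 8682 533440 160 833), p.1 < (9515:Int) := by
    intro p hp
    rcases List.mem_append.1 hp with h | h
    · exact lt_of_lt_of_le (K4 p h) (by norm_num)
    · exact pvSeg_keys _ _ _ _ _ (by norm_num) p h
  have K6 : ∀ p ∈ ((((((pvSeg 0 0 32 4167) ++ pvSeg 4167 133344 64 2084) ++ pvSeg 6251 266720 96 1389) ++ pvSeg 7640 400064 128 1042) ++ pvSeg 8682 533440 160 833) ++ pvSeg 9515 666720 192 695), p.1 < (10210:Int) := by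
    intro p hp
    rcases List.mem_append.1 hp with h | h
    · exact lt_of_lt_of_le (K5 p h) (by norm_num)
    · exact pvSeg_keys _ _ _ _ _ (by norm_num) p h
  have K7 : ∀ p ∈ (((((((pvSeg 0 0 32 4167) ++ pvSeg 4167 133344 64 2084) ++ pvSeg 6251 266720 96 1389) ++ pvSeg 7640 400064 128 1042) ++ pvSeg 8682 533440 160 833) ++ pvSeg 9515 666720 192 695) ++ pvSeg 10210 800160 224 595), p.1 < (10805:Int) := by
    intro p hp
    rcases List.mem_append.1 hp with h | h
    · exact lt_of_lt_of_le (K6 p h) (by norm_num)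
    · exact pvSeg_keys _ _ _ _ _ (by norm_num) p h
  have K8 : ∀ p ∈ ((((((((pvSeg 0 0 32 4167) ++ pvSeg 4167 133344 64 2084) ++ pvSeg 6251 266720 96 1389) ++ pvSeg 7640 400064 128 1042) ++ pvSeg 8682 533440 160 833) ++ pvSeg 9515 666720 192 695) ++ pvSeg 10210 800160 224 595) ++ pvSeg 10805 933440 256 521), p.1 < (11326:Int) := by
    intro p hp
    rcases List.mem_append.1 hp with h | h
    · exact lt_of_lt_of_le (K7 p h) (by norm_num)
    · exact pvSeg_keys _ _ _ _ _ (by norm_num) p h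
  have K9 : ∀ p ∈ (((((((((pvSeg 0 0 32 4167) ++ pvSeg 4167 133344 64 2084) ++ pvSeg 6251 266720 96 1389) ++ pvSeg 7640 400064 128 1042) ++ pvSeg 8682 533440 160 833) ++ pvSeg 9515 666720 192 695) ++ pvSeg 10210 800160 224 595) ++ pvSeg 10805 933440 256 521) ++ pvSeg 11326 1066816 288 463), p.1 < (11789:Int) := by
    intro p hp
    rcases List.mem_append.1 hp with h | h
    · exact lt_of_lt_of_le (K8 p h) (by norm_num)
    · exact pvSeg_keys _ _ _ _ _ (by norm_num) p h
  have K10 : ∀ p ∈ ((((((((((pvSeg 0 0 32 4167) ++ pvSeg 4167 133344 64 2084) ++ pvSeg 6251 266720 96 1389) ++ pvSeg 7640 400064 128 1042) ++ pvSeg 8682 533440 160 833) ++ pvSeg 9515 666720 192 695) ++ pvSeg 10210 800160 224 595) ++ pvSeg 10805 933440 256 521) ++ pvSeg 11326 1066816 288 463) ++ pvSeg 11789 1200160 320 417), p.1 < (12206:Int) := by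
    intro p hp
    rcases List.mem_append.1 hp with h | h
    · exact lt_of_lt_of_le (K9 p h) (by norm_num)
    · exact pvSeg_keys _ _ _ _ _ (by norm_num) p h
  have K11 : ∀ p ∈ (((((((((((pvSeg 0 0 32 4167) ++ pvSeg 4167 133344 64 2084) ++ pvSeg 6251 266720 96 1389) ++ pvSeg 7640 400064 128 1042) ++ pvSeg 8682 533440 160 833) ++ pvSeg 9515 666720 192 695) ++ pvSeg 10210 800160 224 595) ++ pvSeg 10805 933440 256 521) ++ pvSeg 11326 1066816 288 463) ++ pvSeg 11789 1200160 320 417) ++ pvSeg 12206 1333600 352 379), p.1 < (12585:Int) := by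
    intro p hp
    rcases List.mem_append.1 hp with h | h
    · exact lt_of_lt_of_le (K10 p h) (by norm_num)
    · exact pvSeg_keys _ _ _ _ _ (by norm_num) p h
  have K12 : ∀ p ∈ ((((((((((((pvSeg 0 0 32 4167) ++ pvSeg 4167 133344 64 2084) ++ pvSeg 6251 266720 96 1389) ++ pvSeg 7640 400064 128 1042) ++ pvSeg 8682 533440 160 833) ++ pvSeg 9515 666720 192 695) ++ pvSeg 10210 800160 224 595) ++ pvSeg 10805 933440 256 521) ++ pvSeg 11326 1066816 288 463) ++ pvSeg 11789 1200160 320 417) ++ pvSeg 12206 1333600 352 379) ++ pvSeg 12585 1467008 384 347), p.1 < (12932:Int) := by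
    intro p hp
    rcases List.mem_append.1 hp with h | h
    · exact lt_of_lt_of_le (K11 p h) (by norm_num)
    · exact pvSeg_keys _ _ _ _ _ (by norm_num) p h
  have K13 : ∀ p ∈ (((((((((((((pvSeg 0 0 32 4167) ++ pvSeg 4167 133344 64 2084) ++ pvSeg 6251 266720 96 1389) ++ pvSeg 7640 400064 128 1042) ++ pvSeg 8682 533440 160 833) ++ pvSeg 9515 666720 192 695) ++ pvSeg 10210 800160 224 595) ++ pvSeg 10805 933440 256 521) ++ pvSeg 11326 1066816 288 463) ++ pvSeg 11789 1200160 320 417) ++ pvSeg 12206 1333600 352 379) ++ pvSeg 12585 1467008 384 347) ++ pvSeg 12932 1600256 416 320), p.1 < (13252:Int) := by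
    intro p hp
    rcases List.mem_append.1 hp with h | h
    · exact lt_of_lt_of_le (K12 p h) (by norm_num)
    · exact pvSeg_keys _ _ _ _ _ (by norm_num) p h
  have K14 : ∀ p ∈ ((((((((((((((pvSeg 0 0 32 4167) ++ pvSeg 4167 133344 64 2084) ++ pvSeg 6251 266720 96 1389) ++ pvSeg 7640 400064 128 1042) ++ pvSeg 8682 533440 160 833) ++ pvSeg 9515 666720 192 695) ++ pvSeg 10210 800160 224 595) ++ pvSeg 10805 933440 256 521) ++ pvSeg 11326 1066816 288 463) ++ pvSeg 11789 1200160 320 417) ++ pvSeg 12206 1333600 352 379) ++ pvSeg 12585 1467008 384 347) ++ pvSeg 12932 1600256 416 320) ++ pvSeg 13252 1733376 448 298), p.1 < (13550:Int) := by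
    intro p hp
    rcases List.mem_append.1 hp with h | h
    · exact lt_of_lt_of_le (K13 p h) (by norm_num)
    · exact pvSeg_keys _ _ _ _ _ (by norm_num) p h
  have s0 : pvRampupStep (PySem.Dict.mk ([] : List (Int × Int)), 0, 0) 0
      = (PySem.Dict.mk (pvSeg 0 0 32 4167), 4167, 133344) := by
    rw [pvStage _ 0 0 0 32 133334 4167 4167 (by norm_num) (by decide) (by decide) (by norm_num) K0]
    simp only [Prod.mk.injEq, List.nil_append]
    exact ⟨by trivial, by norm_num, by norm_num⟩
  have s1 : pvRampupStep (PySem.Dict.mk (pvSeg 0 0 32 4167), 4167, 133344) 1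
      = (PySem.Dict.mk ((pvSeg 0 0 32 4167) ++ pvSeg 4167 133344 64 2084), 6251, 266720) := by
    rw [pvStage _ 4167 133344 1 64 266667 2084 2084 (by norm_num) (by decide) (by decide) (by norm_num) K1]
    simp only [Prod.mk.injEq]
    exact ⟨by trivial, by norm_num, by norm_num⟩
  have s2 : pvRampupStep (PySem.Dict.mk ((pvSeg 0 0 32 4167) ++ pvSeg 4167 133344 64 2084), 6251, 266720) 2
      = (PySem.Dict.mk (((pvSeg 0 0 32 4167) ++ pvSeg 4167 133344 64 2084) ++ pvSeg 6251 266720 96 1389), 7640, 400064) := by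
    rw [pvStage _ 6251 266720 2 96 400000 1389 1389 (by norm_num) (by decide) (by decide) (by norm_num) K2]
    simp only [Prod.mk.injEq]
    exact ⟨by trivial, by norm_num, by norm_num⟩
  have s3 : pvRampupStep (PySem.Dict.mk (((pvSeg 0 0 32 4167) ++ pvSeg 4167 133344 64 2084) ++ pvSeg 6251 266720 96 1389), 7640, 400064) 3
      = (PySem.Dict.mk ((((pvSeg 0 0 32 4167) ++ pvSeg 4167 133344 64 2084) ++ pvSeg 6251 266720 96 1389) ++ pvSeg 7640 400064 128 1042), 8682, 533440) := by
    rw [pvStage _ 7640 400064 3 128 533334 1042 1042 (by norm_num) (by decide) (by decide) (by norm_num) K3]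
    simp only [Prod.mk.injEq]
    exact ⟨by trivial, by norm_num, by norm_num⟩
  have s4 : pvRampupStep (PySem.Dict.mk ((((pvSeg 0 0 32 4167) ++ pvSeg 4167 133344 64 2084) ++ pvSeg 6251 266720 96 1389) ++ pvSeg 7640 400064 128 1042), 8682, 533440) 4
      = (PySem.Dict.mk (((((pvSeg 0 0 32 4167) ++ pvSeg 4167 133344 64 2084) ++ pvSeg 6251 266720 96 1389) ++ pvSeg 7640 400064 128 1042) ++ pvSeg 8682 533440 160 833), 9515, 666720) := by
    rw [pvStage _ 8682 533440 4 160 666667 833 833 (by norm_num) (by decide) (by decide) (by norm_num) K4]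
    simp only [Prod.mk.injEq]
    exact ⟨by trivial, by norm_num, by norm_num⟩
  have s5 : pvRampupStep (PySem.Dict.mk (((((pvSeg 0 0 32 4167) ++ pvSeg 4167 133344 64 2084) ++ pvSeg 6251 266720 96 1389) ++ pvSeg 7640 400064 128 1042) ++ pvSeg 8682 533440 160 833), 9515, 666720) 5
      = (PySem.Dict.mk ((((((pvSeg 0 0 32 4167) ++ pvSeg 4167 133344 64 2084) ++ pvSeg 6251 266720 96 1389) ++ pvSeg 7640 400064 128 1042) ++ pvSeg 8682 533440 160 833) ++ pvSeg 9515 666720 192 695), 10210, 800160) := by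
    rw [pvStage _ 9515 666720 5 192 800000 695 695 (by norm_num) (by decide) (by decide) (by norm_num) K5]
    simp only [Prod.mk.injEq]
    exact ⟨by trivial, by norm_num, by norm_num⟩
  have s6 : pvRampupStep (PySem.Dict.mk ((((((pvSeg 0 0 32 4167) ++ pvSeg 4167 133344 64 2084) ++ pvSeg 6251 266720 96 1389) ++ pvSeg 7640 400064 128 1042) ++ pvSeg 8682 533440 160 833) ++ pvSeg 9515 666720 192 695), 10210, 800160) 6
      = (PySem.Dict.mk (((((((pvSeg 0 0 32 4167) ++ pvSeg 4167 133344 64 2084) ++ pvSeg 6251 266720 96 1389) ++ pvSeg 7640 400064 128 1042) ++ pvSeg 8682 533440 160 833) ++ pvSeg 9515 666720 192 695) ++ pvSeg 10210 800160 224 595), 10805, 933440) := by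
    rw [pvStage _ 10210 800160 6 224 933334 595 595 (by norm_num) (by decide) (by decide) (by norm_num) K6]
    simp only [Prod.mk.injEq]
    exact ⟨by trivial, by norm_num, by norm_num⟩
  have s7 : pvRampupStep (PySem.Dict.mk (((((((pvSeg 0 0 32 4167) ++ pvSeg 4167 133344 64 2084) ++ pvSeg 6251 266720 96 1389) ++ pvSeg 7640 400064 128 1042) ++ pvSeg 8682 533440 160 833) ++ pvSeg 9515 666720 192 695) ++ pvSeg 10210 800160 224 595), 10805, 933440) 7
      = (PySem.Dict.mk ((((((((pvSeg 0 0 32 4167) ++ pvSeg 4167 133344 64 2084) ++ pvSeg 6251 266720 96 1389) ++ pvSeg 7640 400064 128 1042) ++ pvSeg 8682 533440 160 833) ++ pvSeg 9515 666720 192 695) ++ pvSeg 10210 800160 224 595) ++ pvSeg 10805 933440 256 521), 11326, 1066816) := by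
    rw [pvStage _ 10805 933440 7 256 1066667 521 521 (by norm_num) (by decide) (by decide) (by norm_num) K7]
    simp only [Prod.mk.injEq]
    exact ⟨by trivial, by norm_num, by norm_num⟩
  have s8 : pvRampupStep (PySem.Dict.mk ((((((((pvSeg 0 0 32 4167) ++ pvSeg 4167 133344 64 2084) ++ pvSeg 6251 266720 96 1389) ++ pvSeg 7640 400064 128 1042) ++ pvSeg 8682 533440 160 833) ++ pvSeg 9515 666720 192 695) ++ pvSeg 10210 800160 224 595) ++ pvSeg 10805 933440 256 521), 11326, 1066816) 8
      = (PySem.Dict.mk (((((((((pvSeg 0 0 32 4167) ++ pvSeg 4167 133344 64 2084) ++ pvSeg 6251 266720 96 1389) ++ pvSeg 7640 400064 128 1042) ++ pvSeg 8682 533440 160 833) ++ pvSeg 9515 666720 192 695) ++ pvSeg 10210 800160 224 595) ++ pvSeg 10805 933440 256 521) ++ pvSeg 11326 1066816 288 463), 11789, 1200160) := by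
    rw [pvStage _ 11326 1066816 8 288 1200000 463 463 (by norm_num) (by decide) (by decide) (by norm_num) K8]
    simp only [Prod.mk.injEq]
    exact ⟨by trivial, by norm_num, by norm_num⟩
  have s9 : pvRampupStep (PySem.Dict.mk (((((((((pvSeg 0 0 32 4167) ++ pvSeg 4167 133344 64 2084) ++ pvSeg 6251 266720 96 1389) ++ pvSeg 7640 400064 128 1042) ++ pvSeg 8682 533440 160 833) ++ pvSeg 9515 666720 192 695) ++ pvSeg 10210 800160 224 595) ++ pvSeg 10805 933440 256 521) ++ pvSeg 11326 1066816 288 463), 11789, 1200160) 9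
      = (PySem.Dict.mk ((((((((((pvSeg 0 0 32 4167) ++ pvSeg 4167 133344 64 2084) ++ pvSeg 6251 266720 96 1389) ++ pvSeg 7640 400064 128 1042) ++ pvSeg 8682 533440 160 833) ++ pvSeg 9515 666720 192 695) ++ pvSeg 10210 800160 224 595) ++ pvSeg 10805 933440 256 521) ++ pvSeg 11326 1066816 288 463) ++ pvSeg 11789 1200160 320 417), 12206, 1333600) := by
    rw [pvStage _ 11789 1200160 9 320 1333334 417 417 (by norm_num) (by decide) (by decide) (by norm_num) K9]
    simp only [Prod.mk.injEq]
    exact ⟨by trivial, by norm_num, by norm_num⟩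
  have s10 : pvRampupStep (PySem.Dict.mk ((((((((((pvSeg 0 0 32 4167) ++ pvSeg 4167 133344 64 2084) ++ pvSeg 6251 266720 96 1389) ++ pvSeg 7640 400064 128 1042) ++ pvSeg 8682 533440 160 833) ++ pvSeg 9515 666720 192 695) ++ pvSeg 10210 800160 224 595) ++ pvSeg 10805 933440 256 521) ++ pvSeg 11326 1066816 288 463) ++ pvSeg 11789 1200160 320 417), 12206, 1333600) 10
      = (PySem.Dict.mk (((((((((((pvSeg 0 0 32 4167) ++ pvSeg 4167 133344 64 2084) ++ pvSeg 6251 266720 96 1389) ++ pvSeg 7640 400064 128 1042) ++ pvSeg 8682 533440 160 833) ++ pvSeg 9515 666720 192 695) ++ pvSeg 10210 800160 224 595) ++ pvSeg 10805 933440 256 521) ++ pvSeg 11326 1066816 288 463) ++ pvSeg 11789 1200160 320 417) ++ pvSeg 12206 1333600 352 379), 12585, 1467008) := by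
    rw [pvStage _ 12206 1333600 10 352 1466667 379 379 (by norm_num) (by decide) (by decide) (by norm_num) K10]
    simp only [Prod.mk.injEq]
    exact ⟨by trivial, by norm_num, by norm_num⟩
  have s11 : pvRampupStep (PySem.Dict.mk (((((((((((pvSeg 0 0 32 4167) ++ pvSeg 4167 133344 64 2084) ++ pvSeg 6251 266720 96 1389) ++ pvSeg 7640 400064 128 1042) ++ pvSeg 8682 533440 160 833) ++ pvSeg 9515 666720 192 695) ++ pvSeg 10210 800160 224 595) ++ pvSeg 10805 933440 256 521) ++ pvSeg 11326 1066816 288 463) ++ pvSeg 11789 1200160 320 417) ++ pvSeg 12206 1333600 352 379), 12585, 1467008) 11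
      = (PySem.Dict.mk ((((((((((((pvSeg 0 0 32 4167) ++ pvSeg 4167 133344 64 2084) ++ pvSeg 6251 266720 96 1389) ++ pvSeg 7640 400064 128 1042) ++ pvSeg 8682 533440 160 833) ++ pvSeg 9515 666720 192 695) ++ pvSeg 10210 800160 224 595) ++ pvSeg 10805 933440 256 521) ++ pvSeg 11326 1066816 288 463) ++ pvSeg 11789 1200160 320 417) ++ pvSeg 12206 1333600 352 379) ++ pvSeg 12585 1467008 384 347), 12932, 1600256) := by
    rw [pvStage _ 12585 1467008 11 384 1600000 347 347 (by norm_num) (by decide) (by decide) (by norm_num) K11]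
    simp only [Prod.mk.injEq]
    exact ⟨by trivial, by norm_num, by norm_num⟩
  have s12 : pvRampupStep (PySem.Dict.mk ((((((((((((pvSeg 0 0 32 4167) ++ pvSeg 4167 133344 64 2084) ++ pvSeg 6251 266720 96 1389) ++ pvSeg 7640 400064 128 1042) ++ pvSeg 8682 533440 160 833) ++ pvSeg 9515 666720 192 695) ++ pvSeg 10210 800160 224 595) ++ pvSeg 10805 933440 256 521) ++ pvSeg 11326 1066816 288 463) ++ pvSeg 11789 1200160 320 417) ++ pvSeg 12206 1333600 352 379) ++ pvSeg 12585 1467008 384 347), 12932, 1600256) 12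
      = (PySem.Dict.mk (((((((((((((pvSeg 0 0 32 4167) ++ pvSeg 4167 133344 64 2084) ++ pvSeg 6251 266720 96 1389) ++ pvSeg 7640 400064 128 1042) ++ pvSeg 8682 533440 160 833) ++ pvSeg 9515 666720 192 695) ++ pvSeg 10210 800160 224 595) ++ pvSeg 10805 933440 256 521) ++ pvSeg 11326 1066816 288 463) ++ pvSeg 11789 1200160 320 417) ++ pvSeg 12206 1333600 352 379) ++ pvSeg 12585 1467008 384 347) ++ pvSeg 12932 1600256 416 320), 13252, 1733376) := by
    rw [pvStage _ 12932 1600256 12 416 1733334 320 320 (by norm_num) (by decide) (by decide) (by norm_num) K12]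
    simp only [Prod.mk.injEq]
    exact ⟨by trivial, by norm_num, by norm_num⟩
  have s13 : pvRampupStep (PySem.Dict.mk (((((((((((((pvSeg 0 0 32 4167) ++ pvSeg 4167 133344 64 2084) ++ pvSeg 6251 266720 96 1389) ++ pvSeg 7640 400064 128 1042) ++ pvSeg 8682 533440 160 833) ++ pvSeg 9515 666720 192 695) ++ pvSeg 10210 800160 224 595) ++ pvSeg 10805 933440 256 521) ++ pvSeg 11326 1066816 288 463) ++ pvSeg 11789 1200160 320 417) ++ pvSeg 12206 1333600 352 379) ++ pvSeg 12585 1467008 384 347) ++ pvSeg 12932 1600256 416 320), 13252, 1733376) 13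
      = (PySem.Dict.mk ((((((((((((((pvSeg 0 0 32 4167) ++ pvSeg 4167 133344 64 2084) ++ pvSeg 6251 266720 96 1389) ++ pvSeg 7640 400064 128 1042) ++ pvSeg 8682 533440 160 833) ++ pvSeg 9515 666720 192 695) ++ pvSeg 10210 800160 224 595) ++ pvSeg 10805 933440 256 521) ++ pvSeg 11326 1066816 288 463) ++ pvSeg 11789 1200160 320 417) ++ pvSeg 12206 1333600 352 379) ++ pvSeg 12585 1467008 384 347) ++ pvSeg 12932 1600256 416 320) ++ pvSeg 13252 1733376 448 298), 13550, 1866880) := by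
    rw [pvStage _ 13252 1733376 13 448 1866667 298 298 (by norm_num) (by decide) (by decide) (by norm_num) K13]
    simp only [Prod.mk.injEq]
    exact ⟨by trivial, by norm_num, by norm_num⟩
  have s14 : pvRampupStep (PySem.Dict.mk ((((((((((((((pvSeg 0 0 32 4167) ++ pvSeg 4167 133344 64 2084) ++ pvSeg 6251 266720 96 1389) ++ pvSeg 7640 400064 128 1042) ++ pvSeg 8682 533440 160 833) ++ pvSeg 9515 666720 192 695) ++ pvSeg 10210 800160 224 595) ++ pvSeg 10805 933440 256 521) ++ pvSeg 11326 1066816 288 463) ++ pvSeg 11789 1200160 320 417) ++ pvSeg 12206 1333600 352 379) ++ pvSeg 12585 1467008 384 347) ++ pvSeg 12932 1600256 416 320) ++ pvSeg 13252 1733376 448 298), 13550, 1866880) 14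
      = (PySem.Dict.mk (((((((((((((((pvSeg 0 0 32 4167) ++ pvSeg 4167 133344 64 2084) ++ pvSeg 6251 266720 96 1389) ++ pvSeg 7640 400064 128 1042) ++ pvSeg 8682 533440 160 833) ++ pvSeg 9515 666720 192 695) ++ pvSeg 10210 800160 224 595) ++ pvSeg 10805 933440 256 521) ++ pvSeg 11326 1066816 288 463) ++ pvSeg 11789 1200160 320 417) ++ pvSeg 12206 1333600 352 379) ++ pvSeg 12585 1467008 384 347) ++ pvSeg 12932 1600256 416 320) ++ pvSeg 13252 1733376 448 298) ++ pvSeg 13550 1866880 480 278), 13828, 2000320) := by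
    rw [pvStage _ 13550 1866880 14 480 2000000 278 278 (by norm_num) (by decide) (by decide) (by norm_num) K14]
    simp only [Prod.mk.injEq]
    exact ⟨by trivial, by norm_num, by norm_num⟩
  have hr : PySem.List.pyRange 0 15 1 = [0,1,2,3,4,5,6,7,8,9,10,11,12,13,14] := by decide
  rw [hr]
  simp only [List.foldl_cons, List.foldl_nil]
  rw [show (PySem.Dict.empty : PySem.Dict Int Int) = PySem.Dict.mk [] from rfl]
  rw [s0, s1, s2, s3, s4, s5, s6, s7, s8, s9, s10, s11, s12, s13, s14]
  simp only [pvBIG, List.append_assoc, List.append_nil]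

-- cache lookup as a 15-way piecewise-linear function of the step
set_option maxRecDepth 8192 in
set_option maxHeartbeats 1000000 in
theorem pvG (k : Int) :
    (PySem.Dict.mk pvBIG).get? k =
      (if 0 ≤ k ∧ k < 4167 then some ((0 + (k - 0) * 32) * 2048)
      else if 4167 ≤ k ∧ k < 6251 then some ((133344 + (k - 4167) * 64) * 2048)
      else if 6251 ≤ k ∧ k < 7640 then some ((266720 + (k - 6251) * 96) * 2048)
      else if 7640 ≤ k ∧ k < 8682 then some ((400064 + (k - 7640) * 128) * 2048)
      else if 8682 ≤ k ∧ k < 9515 then some ((533440 + (k - 8682) * 160) * 2048)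
      else if 9515 ≤ k ∧ k < 10210 then some ((666720 + (k - 9515) * 192) * 2048)
      else if 10210 ≤ k ∧ k < 10805 then some ((800160 + (k - 10210) * 224) * 2048)
      else if 10805 ≤ k ∧ k < 11326 then some ((933440 + (k - 10805) * 256) * 2048)
      else if 11326 ≤ k ∧ k < 11789 then some ((1066816 + (k - 11326) * 288) * 2048)
      else if 11789 ≤ k ∧ k < 12206 then some ((1200160 + (k - 11789) * 320) * 2048)
      else if 12206 ≤ k ∧ k < 12585 then some ((1333600 + (k - 12206) * 352) * 2048)
      else if 12585 ≤ k ∧ k < 12932 then some ((1467008 + (k - 12585) * 384) * 2048)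
      else if 12932 ≤ k ∧ k < 13252 then some ((1600256 + (k - 12932) * 416) * 2048)
      else if 13252 ≤ k ∧ k < 13550 then some ((1733376 + (k - 13252) * 448) * 2048)
      else if 13550 ≤ k ∧ k < 13828 then some ((1866880 + (k - 13550) * 480) * 2048)
      else none) := by
  unfold pvBIG
  simp only [List.append_assoc]
  rw [pv_get?_mk_seg, pv_get?_mk_seg, pv_get?_mk_seg, pv_get?_mk_seg, pv_get?_mk_seg,
      pv_get?_mk_seg, pv_get?_mk_seg, pv_get?_mk_seg, pv_get?_mk_seg, pv_get?_mk_seg,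
      pv_get?_mk_seg, pv_get?_mk_seg, pv_get?_mk_seg, pv_get?_mk_seg, pv_get?_mk_seg]
  rw [show (PySem.Dict.mk ([] : List (Int × Int))).get? k = none from rfl]
  norm_num

-- B's reversed table scan as a piecewise-linear function of the step
theorem pvB_char (k : Int) :
    checkpoint_step_to_tokens_alt k =
      (if 13828 ≤ k then ((2000320) + (k - 13828) * 512) * 2048
      else if 13550 ≤ k then ((1866880) + (k - 13550) * 480) * 2048
      else if 13252 ≤ k then ((1733376) + (k - 13252) * 448) * 2048
      else if 12932 ≤ k then ((1600256) + (k - 12932) * 416) * 2048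
      else if 12585 ≤ k then ((1467008) + (k - 12585) * 384) * 2048
      else if 12206 ≤ k then ((1333600) + (k - 12206) * 352) * 2048
      else if 11789 ≤ k then ((1200160) + (k - 11789) * 320) * 2048
      else if 11326 ≤ k then ((1066816) + (k - 11326) * 288) * 2048
      else if 10805 ≤ k then ((933440) + (k - 10805) * 256) * 2048
      else if 10210 ≤ k then ((800160) + (k - 10210) * 224) * 2048
      else if 9515 ≤ k then ((666720) + (k - 9515) * 192) * 2048
      else if 8682 ≤ k then ((533440) + (k - 8682) * 160) * 2048
      else if 7640 ≤ k then ((400064) + (k - 7640) * 128) * 2048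
      else if 6251 ≤ k then ((266720) + (k - 6251) * 96) * 2048
      else if 4167 ≤ k then ((133344) + (k - 4167) * 64) * 2048
      else if 0 ≤ k then ((0) + (k - 0) * 32) * 2048
      else 0) := by
  unfold checkpoint_step_to_tokens_alt
  rw [show pvSegments.reverse = [(13828, 2000320, 512), (13550, 1866880, 480), (13252, 1733376, 448),
    (12932, 1600256, 416), (12585, 1467008, 384), (12206, 1333600, 352), (11789, 1200160, 320),
    (11326, 1066816, 288), (10805, 933440, 256), (10210, 800160, 224), (9515, 666720, 192),
    (8682, 533440, 160), (7640, 400064, 128), (6251, 266720, 96), (4167, 133344, 64),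
    (0, 0, 32)] from by decide]
  simp only [pvFindSegment]
  by_cases h0 : (13828:Int) ≤ k
  · rw [if_pos h0, if_pos h0]
  · rw [if_neg h0, if_neg h0]
    by_cases h1 : (13550:Int) ≤ k
    · rw [if_pos h1, if_pos h1]
    · rw [if_neg h1, if_neg h1]
      by_cases h2 : (13252:Int) ≤ k
      · rw [if_pos h2, if_pos h2]
      · rw [if_neg h2, if_neg h2]
        by_cases h3 : (12932:Int) ≤ k
        · rw [if_pos h3, if_pos h3]
        · rw [if_neg h3, if_neg h3]
          by_cases h4 : (12585:Int) ≤ k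
          · rw [if_pos h4, if_pos h4]
          · rw [if_neg h4, if_neg h4]
            by_cases h5 : (12206:Int) ≤ k
            · rw [if_pos h5, if_pos h5]
            · rw [if_neg h5, if_neg h5]
              by_cases h6 : (11789:Int) ≤ k
              · rw [if_pos h6, if_pos h6]
              · rw [if_neg h6, if_neg h6]
                by_cases h7 : (11326:Int) ≤ k
                · rw [if_pos h7, if_pos h7]
                · rw [if_neg h7, if_neg h7]
                  by_cases h8 : (10805:Int) ≤ k
                  · rw [if_pos h8, if_pos h8]
                  · rw [if_neg h8, if_neg h8]
                    by_cases h9 : (10210:Int) ≤ k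
                    · rw [if_pos h9, if_pos h9]
                    · rw [if_neg h9, if_neg h9]
                      by_cases h10 : (9515:Int) ≤ k
                      · rw [if_pos h10, if_pos h10]
                      · rw [if_neg h10, if_neg h10]
                        by_cases h11 : (8682:Int) ≤ k
                        · rw [if_pos h11, if_pos h11]
                        · rw [if_neg h11, if_neg h11]
                          by_cases h12 : (7640:Int) ≤ k
                          · rw [if_pos h12, if_pos h12]
                          · rw [if_neg h12, if_neg h12]
                            by_cases h13 : (6251:Int) ≤ k
                            · rw [if_pos h13, if_pos h13]
                            · rw [if_neg h13, if_neg h13]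
                              by_cases h14 : (4167:Int) ≤ k
                              · rw [if_pos h14, if_pos h14]
                              · rw [if_neg h14, if_neg h14]
                                by_cases h15 : (0:Int) ≤ k
                                · rw [if_pos h15, if_pos h15]
                                · rw [if_neg h15, if_neg h15]

-- ===== VERDICT (by name: the statement is the Claim_ definition above) =====
set_option maxRecDepth 8192 in
set_option maxHeartbeats 4000000 in
theorem checkpoint_step_to_tokens_spec : Claim_equal_checkpoint_step_to_tokens := by
  intro k _ hpre
  unfold Pre_checkpoint_step_to_tokens at hpre
  unfold Spec_checkpoint_step_to_tokens
  unfold checkpoint_step_to_tokens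
  rw [show PySem.Int.floordiv (512 - 32) 32 = 15 from by decide]
  simp only []
  rw [pv_cache_eq]
  simp only []
  rw [pvB_char]
  by_cases c0 : k < 4167
  · rw [PySem.Dict.contains_eq_isSome_get?, PySem.Dict.getD_eq_get?_getD, PySem.Dict.get?_insert,
        if_neg (by omega : ¬ k = (13828:Int)), pvG,
        if_pos (by omega : (0:Int) ≤ k ∧ k < 4167),
        if_neg (by omega : ¬ ((13828:Int) ≤ k)),
        if_neg (by omega : ¬ ((13550:Int) ≤ k)),
        if_neg (by omega : ¬ ((13252:Int) ≤ k)),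
        if_neg (by omega : ¬ ((12932:Int) ≤ k)),
        if_neg (by omega : ¬ ((12585:Int) ≤ k)),
        if_neg (by omega : ¬ ((12206:Int) ≤ k)),
        if_neg (by omega : ¬ ((11789:Int) ≤ k)),
        if_neg (by omega : ¬ ((11326:Int) ≤ k)),
        if_neg (by omega : ¬ ((10805:Int) ≤ k)),
        if_neg (by omega : ¬ ((10210:Int) ≤ k)),
        if_neg (by omega : ¬ ((9515:Int) ≤ k)),
        if_neg (by omega : ¬ ((8682:Int) ≤ k)),
        if_neg (by omega : ¬ ((7640:Int) ≤ k)),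
        if_neg (by omega : ¬ ((6251:Int) ≤ k)),
        if_neg (by omega : ¬ ((4167:Int) ≤ k)),
        if_pos (by omega : (0:Int) ≤ k)]
    simp only [Option.isSome_some, Option.getD_some, if_true]
  by_cases c1 : k < 6251
  · rw [PySem.Dict.contains_eq_isSome_get?, PySem.Dict.getD_eq_get?_getD, PySem.Dict.get?_insert,
        if_neg (by omega : ¬ k = (13828:Int)), pvG,
        if_neg (by omega : ¬ ((0:Int) ≤ k ∧ k < 4167)),
        if_pos (by omega : (4167:Int) ≤ k ∧ k < 6251),
        if_neg (by omega : ¬ ((13828:Int) ≤ k)),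
        if_neg (by omega : ¬ ((13550:Int) ≤ k)),
        if_neg (by omega : ¬ ((13252:Int) ≤ k)),
        if_neg (by omega : ¬ ((12932:Int) ≤ k)),
        if_neg (by omega : ¬ ((12585:Int) ≤ k)),
        if_neg (by omega : ¬ ((12206:Int) ≤ k)),
        if_neg (by omega : ¬ ((11789:Int) ≤ k)),
        if_neg (by omega : ¬ ((11326:Int) ≤ k)),
        if_neg (by omega : ¬ ((10805:Int) ≤ k)),
        if_neg (by omega : ¬ ((10210:Int) ≤ k)),
        if_neg (by omega : ¬ ((9515:Int) ≤ k)),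
        if_neg (by omega : ¬ ((8682:Int) ≤ k)),
        if_neg (by omega : ¬ ((7640:Int) ≤ k)),
        if_neg (by omega : ¬ ((6251:Int) ≤ k)),
        if_pos (by omega : (4167:Int) ≤ k)]
    simp only [Option.isSome_some, Option.getD_some, if_true]
  by_cases c2 : k < 7640
  · rw [PySem.Dict.contains_eq_isSome_get?, PySem.Dict.getD_eq_get?_getD, PySem.Dict.get?_insert,
        if_neg (by omega : ¬ k = (13828:Int)), pvG,
        if_neg (by omega : ¬ ((0:Int) ≤ k ∧ k < 4167)),
        if_neg (by omega : ¬ ((4167:Int) ≤ k ∧ k < 6251)),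
        if_pos (by omega : (6251:Int) ≤ k ∧ k < 7640),
        if_neg (by omega : ¬ ((13828:Int) ≤ k)),
        if_neg (by omega : ¬ ((13550:Int) ≤ k)),
        if_neg (by omega : ¬ ((13252:Int) ≤ k)),
        if_neg (by omega : ¬ ((12932:Int) ≤ k)),
        if_neg (by omega : ¬ ((12585:Int) ≤ k)),
        if_neg (by omega : ¬ ((12206:Int) ≤ k)),
        if_neg (by omega : ¬ ((11789:Int) ≤ k)),
        if_neg (by omega : ¬ ((11326:Int) ≤ k)),
        if_neg (by omega : ¬ ((10805:Int) ≤ k)),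
        if_neg (by omega : ¬ ((10210:Int) ≤ k)),
        if_neg (by omega : ¬ ((9515:Int) ≤ k)),
        if_neg (by omega : ¬ ((8682:Int) ≤ k)),
        if_neg (by omega : ¬ ((7640:Int) ≤ k)),
        if_pos (by omega : (6251:Int) ≤ k)]
    simp only [Option.isSome_some, Option.getD_some, if_true]
  by_cases c3 : k < 8682
  · rw [PySem.Dict.contains_eq_isSome_get?, PySem.Dict.getD_eq_get?_getD, PySem.Dict.get?_insert,
        if_neg (by omega : ¬ k = (13828:Int)), pvG,
        if_neg (by omega : ¬ ((0:Int) ≤ k ∧ k < 4167)),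
        if_neg (by omega : ¬ ((4167:Int) ≤ k ∧ k < 6251)),
        if_neg (by omega : ¬ ((6251:Int) ≤ k ∧ k < 7640)),
        if_pos (by omega : (7640:Int) ≤ k ∧ k < 8682),
        if_neg (by omega : ¬ ((13828:Int) ≤ k)),
        if_neg (by omega : ¬ ((13550:Int) ≤ k)),
        if_neg (by omega : ¬ ((13252:Int) ≤ k)),
        if_neg (by omega : ¬ ((12932:Int) ≤ k)),
        if_neg (by omega : ¬ ((12585:Int) ≤ k)),
        if_neg (by omega : ¬ ((12206:Int) ≤ k)),
        if_neg (by omega : ¬ ((11789:Int) ≤ k)),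
        if_neg (by omega : ¬ ((11326:Int) ≤ k)),
        if_neg (by omega : ¬ ((10805:Int) ≤ k)),
        if_neg (by omega : ¬ ((10210:Int) ≤ k)),
        if_neg (by omega : ¬ ((9515:Int) ≤ k)),
        if_neg (by omega : ¬ ((8682:Int) ≤ k)),
        if_pos (by omega : (7640:Int) ≤ k)]
    simp only [Option.isSome_some, Option.getD_some, if_true]
  by_cases c4 : k < 9515
  · rw [PySem.Dict.contains_eq_isSome_get?, PySem.Dict.getD_eq_get?_getD, PySem.Dict.get?_insert,
        if_neg (by omega : ¬ k = (13828:Int)), pvG,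
        if_neg (by omega : ¬ ((0:Int) ≤ k ∧ k < 4167)),
        if_neg (by omega : ¬ ((4167:Int) ≤ k ∧ k < 6251)),
        if_neg (by omega : ¬ ((6251:Int) ≤ k ∧ k < 7640)),
        if_neg (by omega : ¬ ((7640:Int) ≤ k ∧ k < 8682)),
        if_pos (by omega : (8682:Int) ≤ k ∧ k < 9515),
        if_neg (by omega : ¬ ((13828:Int) ≤ k)),
        if_neg (by omega : ¬ ((13550:Int) ≤ k)),
        if_neg (by omega : ¬ ((13252:Int) ≤ k)),
        if_neg (by omega : ¬ ((12932:Int) ≤ k)),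
        if_neg (by omega : ¬ ((12585:Int) ≤ k)),
        if_neg (by omega : ¬ ((12206:Int) ≤ k)),
        if_neg (by omega : ¬ ((11789:Int) ≤ k)),
        if_neg (by omega : ¬ ((11326:Int) ≤ k)),
        if_neg (by omega : ¬ ((10805:Int) ≤ k)),
        if_neg (by omega : ¬ ((10210:Int) ≤ k)),
        if_neg (by omega : ¬ ((9515:Int) ≤ k)),
        if_pos (by omega : (8682:Int) ≤ k)]
    simp only [Option.isSome_some, Option.getD_some, if_true]
  by_cases c5 : k < 10210
  · rw [PySem.Dict.contains_eq_isSome_get?, PySem.Dict.getD_eq_get?_getD, PySem.Dict.get?_insert,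
        if_neg (by omega : ¬ k = (13828:Int)), pvG,
        if_neg (by omega : ¬ ((0:Int) ≤ k ∧ k < 4167)),
        if_neg (by omega : ¬ ((4167:Int) ≤ k ∧ k < 6251)),
        if_neg (by omega : ¬ ((6251:Int) ≤ k ∧ k < 7640)),
        if_neg (by omega : ¬ ((7640:Int) ≤ k ∧ k < 8682)),
        if_neg (by omega : ¬ ((8682:Int) ≤ k ∧ k < 9515)),
        if_pos (by omega : (9515:Int) ≤ k ∧ k < 10210),
        if_neg (by omega : ¬ ((13828:Int) ≤ k)),
        if_neg (by omega : ¬ ((13550:Int) ≤ k)),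
        if_neg (by omega : ¬ ((13252:Int) ≤ k)),
        if_neg (by omega : ¬ ((12932:Int) ≤ k)),
        if_neg (by omega : ¬ ((12585:Int) ≤ k)),
        if_neg (by omega : ¬ ((12206:Int) ≤ k)),
        if_neg (by omega : ¬ ((11789:Int) ≤ k)),
        if_neg (by omega : ¬ ((11326:Int) ≤ k)),
        if_neg (by omega : ¬ ((10805:Int) ≤ k)),
        if_neg (by omega : ¬ ((10210:Int) ≤ k)),
        if_pos (by omega : (9515:Int) ≤ k)]
    simp only [Option.isSome_some, Option.getD_some, if_true]
  by_cases c6 : k < 10805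
  · rw [PySem.Dict.contains_eq_isSome_get?, PySem.Dict.getD_eq_get?_getD, PySem.Dict.get?_insert,
        if_neg (by omega : ¬ k = (13828:Int)), pvG,
        if_neg (by omega : ¬ ((0:Int) ≤ k ∧ k < 4167)),
        if_neg (by omega : ¬ ((4167:Int) ≤ k ∧ k < 6251)),
        if_neg (by omega : ¬ ((6251:Int) ≤ k ∧ k < 7640)),
        if_neg (by omega : ¬ ((7640:Int) ≤ k ∧ k < 8682)),
        if_neg (by omega : ¬ ((8682:Int) ≤ k ∧ k < 9515)),
        if_neg (by omega : ¬ ((9515:Int) ≤ k ∧ k < 10210)),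
        if_pos (by omega : (10210:Int) ≤ k ∧ k < 10805),
        if_neg (by omega : ¬ ((13828:Int) ≤ k)),
        if_neg (by omega : ¬ ((13550:Int) ≤ k)),
        if_neg (by omega : ¬ ((13252:Int) ≤ k)),
        if_neg (by omega : ¬ ((12932:Int) ≤ k)),
        if_neg (by omega : ¬ ((12585:Int) ≤ k)),
        if_neg (by omega : ¬ ((12206:Int) ≤ k)),
        if_neg (by omega : ¬ ((11789:Int) ≤ k)),
        if_neg (by omega : ¬ ((11326:Int) ≤ k)),
        if_neg (by omega : ¬ ((10805:Int) ≤ k)),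
        if_pos (by omega : (10210:Int) ≤ k)]
    simp only [Option.isSome_some, Option.getD_some, if_true]
  by_cases c7 : k < 11326
  · rw [PySem.Dict.contains_eq_isSome_get?, PySem.Dict.getD_eq_get?_getD, PySem.Dict.get?_insert,
        if_neg (by omega : ¬ k = (13828:Int)), pvG,
        if_neg (by omega : ¬ ((0:Int) ≤ k ∧ k < 4167)),
        if_neg (by omega : ¬ ((4167:Int) ≤ k ∧ k < 6251)),
        if_neg (by omega : ¬ ((6251:Int) ≤ k ∧ k < 7640)),
        if_neg (by omega : ¬ ((7640:Int) ≤ k ∧ k < 8682)),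
        if_neg (by omega : ¬ ((8682:Int) ≤ k ∧ k < 9515)),
        if_neg (by omega : ¬ ((9515:Int) ≤ k ∧ k < 10210)),
        if_neg (by omega : ¬ ((10210:Int) ≤ k ∧ k < 10805)),
        if_pos (by omega : (10805:Int) ≤ k ∧ k < 11326),
        if_neg (by omega : ¬ ((13828:Int) ≤ k)),
        if_neg (by omega : ¬ ((13550:Int) ≤ k)),
        if_neg (by omega : ¬ ((13252:Int) ≤ k)),
        if_neg (by omega : ¬ ((12932:Int) ≤ k)),
        if_neg (by omega : ¬ ((12585:Int) ≤ k)),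
        if_neg (by omega : ¬ ((12206:Int) ≤ k)),
        if_neg (by omega : ¬ ((11789:Int) ≤ k)),
        if_neg (by omega : ¬ ((11326:Int) ≤ k)),
        if_pos (by omega : (10805:Int) ≤ k)]
    simp only [Option.isSome_some, Option.getD_some, if_true]
  by_cases c8 : k < 11789
  · rw [PySem.Dict.contains_eq_isSome_get?, PySem.Dict.getD_eq_get?_getD, PySem.Dict.get?_insert,
        if_neg (by omega : ¬ k = (13828:Int)), pvG,
        if_neg (by omega : ¬ ((0:Int) ≤ k ∧ k < 4167)),
        if_neg (by omega : ¬ ((4167:Int) ≤ k ∧ k < 6251)),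
        if_neg (by omega : ¬ ((6251:Int) ≤ k ∧ k < 7640)),
        if_neg (by omega : ¬ ((7640:Int) ≤ k ∧ k < 8682)),
        if_neg (by omega : ¬ ((8682:Int) ≤ k ∧ k < 9515)),
        if_neg (by omega : ¬ ((9515:Int) ≤ k ∧ k < 10210)),
        if_neg (by omega : ¬ ((10210:Int) ≤ k ∧ k < 10805)),
        if_neg (by omega : ¬ ((10805:Int) ≤ k ∧ k < 11326)),
        if_pos (by omega : (11326:Int) ≤ k ∧ k < 11789),
        if_neg (by omega : ¬ ((13828:Int) ≤ k)),
        if_neg (by omega : ¬ ((13550:Int) ≤ k)),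
        if_neg (by omega : ¬ ((13252:Int) ≤ k)),
        if_neg (by omega : ¬ ((12932:Int) ≤ k)),
        if_neg (by omega : ¬ ((12585:Int) ≤ k)),
        if_neg (by omega : ¬ ((12206:Int) ≤ k)),
        if_neg (by omega : ¬ ((11789:Int) ≤ k)),
        if_pos (by omega : (11326:Int) ≤ k)]
    simp only [Option.isSome_some, Option.getD_some, if_true]
  by_cases c9 : k < 12206
  · rw [PySem.Dict.contains_eq_isSome_get?, PySem.Dict.getD_eq_get?_getD, PySem.Dict.get?_insert,
        if_neg (by omega : ¬ k = (13828:Int)), pvG,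
        if_neg (by omega : ¬ ((0:Int) ≤ k ∧ k < 4167)),
        if_neg (by omega : ¬ ((4167:Int) ≤ k ∧ k < 6251)),
        if_neg (by omega : ¬ ((6251:Int) ≤ k ∧ k < 7640)),
        if_neg (by omega : ¬ ((7640:Int) ≤ k ∧ k < 8682)),
        if_neg (by omega : ¬ ((8682:Int) ≤ k ∧ k < 9515)),
        if_neg (by omega : ¬ ((9515:Int) ≤ k ∧ k < 10210)),
        if_neg (by omega : ¬ ((10210:Int) ≤ k ∧ k < 10805)),
        if_neg (by omega : ¬ ((10805:Int) ≤ k ∧ k < 11326)),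
        if_neg (by omega : ¬ ((11326:Int) ≤ k ∧ k < 11789)),
        if_pos (by omega : (11789:Int) ≤ k ∧ k < 12206),
        if_neg (by omega : ¬ ((13828:Int) ≤ k)),
        if_neg (by omega : ¬ ((13550:Int) ≤ k)),
        if_neg (by omega : ¬ ((13252:Int) ≤ k)),
        if_neg (by omega : ¬ ((12932:Int) ≤ k)),
        if_neg (by omega : ¬ ((12585:Int) ≤ k)),
        if_neg (by omega : ¬ ((12206:Int) ≤ k)),
        if_pos (by omega : (11789:Int) ≤ k)]
    simp only [Option.isSome_some, Option.getD_some, if_true]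
  by_cases c10 : k < 12585
  · rw [PySem.Dict.contains_eq_isSome_get?, PySem.Dict.getD_eq_get?_getD, PySem.Dict.get?_insert,
        if_neg (by omega : ¬ k = (13828:Int)), pvG,
        if_neg (by omega : ¬ ((0:Int) ≤ k ∧ k < 4167)),
        if_neg (by omega : ¬ ((4167:Int) ≤ k ∧ k < 6251)),
        if_neg (by omega : ¬ ((6251:Int) ≤ k ∧ k < 7640)),
        if_neg (by omega : ¬ ((7640:Int) ≤ k ∧ k < 8682)),
        if_neg (by omega : ¬ ((8682:Int) ≤ k ∧ k < 9515)),
        if_neg (by omega : ¬ ((9515:Int) ≤ k ∧ k < 10210)),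
        if_neg (by omega : ¬ ((10210:Int) ≤ k ∧ k < 10805)),
        if_neg (by omega : ¬ ((10805:Int) ≤ k ∧ k < 11326)),
        if_neg (by omega : ¬ ((11326:Int) ≤ k ∧ k < 11789)),
        if_neg (by omega : ¬ ((11789:Int) ≤ k ∧ k < 12206)),
        if_pos (by omega : (12206:Int) ≤ k ∧ k < 12585),
        if_neg (by omega : ¬ ((13828:Int) ≤ k)),
        if_neg (by omega : ¬ ((13550:Int) ≤ k)),
        if_neg (by omega : ¬ ((13252:Int) ≤ k)),
        if_neg (by omega : ¬ ((12932:Int) ≤ k)),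
        if_neg (by omega : ¬ ((12585:Int) ≤ k)),
        if_pos (by omega : (12206:Int) ≤ k)]
    simp only [Option.isSome_some, Option.getD_some, if_true]
  by_cases c11 : k < 12932
  · rw [PySem.Dict.contains_eq_isSome_get?, PySem.Dict.getD_eq_get?_getD, PySem.Dict.get?_insert,
        if_neg (by omega : ¬ k = (13828:Int)), pvG,
        if_neg (by omega : ¬ ((0:Int) ≤ k ∧ k < 4167)),
        if_neg (by omega : ¬ ((4167:Int) ≤ k ∧ k < 6251)),
        if_neg (by omega : ¬ ((6251:Int) ≤ k ∧ k < 7640)),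
        if_neg (by omega : ¬ ((7640:Int) ≤ k ∧ k < 8682)),
        if_neg (by omega : ¬ ((8682:Int) ≤ k ∧ k < 9515)),
        if_neg (by omega : ¬ ((9515:Int) ≤ k ∧ k < 10210)),
        if_neg (by omega : ¬ ((10210:Int) ≤ k ∧ k < 10805)),
        if_neg (by omega : ¬ ((10805:Int) ≤ k ∧ k < 11326)),
        if_neg (by omega : ¬ ((11326:Int) ≤ k ∧ k < 11789)),
        if_neg (by omega : ¬ ((11789:Int) ≤ k ∧ k < 12206)),
        if_neg (by omega : ¬ ((12206:Int) ≤ k ∧ k < 12585)),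
        if_pos (by omega : (12585:Int) ≤ k ∧ k < 12932),
        if_neg (by omega : ¬ ((13828:Int) ≤ k)),
        if_neg (by omega : ¬ ((13550:Int) ≤ k)),
        if_neg (by omega : ¬ ((13252:Int) ≤ k)),
        if_neg (by omega : ¬ ((12932:Int) ≤ k)),
        if_pos (by omega : (12585:Int) ≤ k)]
    simp only [Option.isSome_some, Option.getD_some, if_true]
  by_cases c12 : k < 13252
  · rw [PySem.Dict.contains_eq_isSome_get?, PySem.Dict.getD_eq_get?_getD, PySem.Dict.get?_insert,
        if_neg (by omega : ¬ k = (13828:Int)), pvG,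
        if_neg (by omega : ¬ ((0:Int) ≤ k ∧ k < 4167)),
        if_neg (by omega : ¬ ((4167:Int) ≤ k ∧ k < 6251)),
        if_neg (by omega : ¬ ((6251:Int) ≤ k ∧ k < 7640)),
        if_neg (by omega : ¬ ((7640:Int) ≤ k ∧ k < 8682)),
        if_neg (by omega : ¬ ((8682:Int) ≤ k ∧ k < 9515)),
        if_neg (by omega : ¬ ((9515:Int) ≤ k ∧ k < 10210)),
        if_neg (by omega : ¬ ((10210:Int) ≤ k ∧ k < 10805)),
        if_neg (by omega : ¬ ((10805:Int) ≤ k ∧ k < 11326)),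
        if_neg (by omega : ¬ ((11326:Int) ≤ k ∧ k < 11789)),
        if_neg (by omega : ¬ ((11789:Int) ≤ k ∧ k < 12206)),
        if_neg (by omega : ¬ ((12206:Int) ≤ k ∧ k < 12585)),
        if_neg (by omega : ¬ ((12585:Int) ≤ k ∧ k < 12932)),
        if_pos (by omega : (12932:Int) ≤ k ∧ k < 13252),
        if_neg (by omega : ¬ ((13828:Int) ≤ k)),
        if_neg (by omega : ¬ ((13550:Int) ≤ k)),
        if_neg (by omega : ¬ ((13252:Int) ≤ k)),
        if_pos (by omega : (12932:Int) ≤ k)]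
    simp only [Option.isSome_some, Option.getD_some, if_true]
  by_cases c13 : k < 13550
  · rw [PySem.Dict.contains_eq_isSome_get?, PySem.Dict.getD_eq_get?_getD, PySem.Dict.get?_insert,
        if_neg (by omega : ¬ k = (13828:Int)), pvG,
        if_neg (by omega : ¬ ((0:Int) ≤ k ∧ k < 4167)),
        if_neg (by omega : ¬ ((4167:Int) ≤ k ∧ k < 6251)),
        if_neg (by omega : ¬ ((6251:Int) ≤ k ∧ k < 7640)),
        if_neg (by omega : ¬ ((7640:Int) ≤ k ∧ k < 8682)),
        if_neg (by omega : ¬ ((8682:Int) ≤ k ∧ k < 9515)),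
        if_neg (by omega : ¬ ((9515:Int) ≤ k ∧ k < 10210)),
        if_neg (by omega : ¬ ((10210:Int) ≤ k ∧ k < 10805)),
        if_neg (by omega : ¬ ((10805:Int) ≤ k ∧ k < 11326)),
        if_neg (by omega : ¬ ((11326:Int) ≤ k ∧ k < 11789)),
        if_neg (by omega : ¬ ((11789:Int) ≤ k ∧ k < 12206)),
        if_neg (by omega : ¬ ((12206:Int) ≤ k ∧ k < 12585)),
        if_neg (by omega : ¬ ((12585:Int) ≤ k ∧ k < 12932)),
        if_neg (by omega : ¬ ((12932:Int) ≤ k ∧ k < 13252)),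
        if_pos (by omega : (13252:Int) ≤ k ∧ k < 13550),
        if_neg (by omega : ¬ ((13828:Int) ≤ k)),
        if_neg (by omega : ¬ ((13550:Int) ≤ k)),
        if_pos (by omega : (13252:Int) ≤ k)]
    simp only [Option.isSome_some, Option.getD_some, if_true]
  by_cases c14 : k < 13828
  · rw [PySem.Dict.contains_eq_isSome_get?, PySem.Dict.getD_eq_get?_getD, PySem.Dict.get?_insert,
        if_neg (by omega : ¬ k = (13828:Int)), pvG,
        if_neg (by omega : ¬ ((0:Int) ≤ k ∧ k < 4167)),
        if_neg (by omega : ¬ ((4167:Int) ≤ k ∧ k < 6251)),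
        if_neg (by omega : ¬ ((6251:Int) ≤ k ∧ k < 7640)),
        if_neg (by omega : ¬ ((7640:Int) ≤ k ∧ k < 8682)),
        if_neg (by omega : ¬ ((8682:Int) ≤ k ∧ k < 9515)),
        if_neg (by omega : ¬ ((9515:Int) ≤ k ∧ k < 10210)),
        if_neg (by omega : ¬ ((10210:Int) ≤ k ∧ k < 10805)),
        if_neg (by omega : ¬ ((10805:Int) ≤ k ∧ k < 11326)),
        if_neg (by omega : ¬ ((11326:Int) ≤ k ∧ k < 11789)),
        if_neg (by omega : ¬ ((11789:Int) ≤ k ∧ k < 12206)),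
        if_neg (by omega : ¬ ((12206:Int) ≤ k ∧ k < 12585)),
        if_neg (by omega : ¬ ((12585:Int) ≤ k ∧ k < 12932)),
        if_neg (by omega : ¬ ((12932:Int) ≤ k ∧ k < 13252)),
        if_neg (by omega : ¬ ((13252:Int) ≤ k ∧ k < 13550)),
        if_pos (by omega : (13550:Int) ≤ k ∧ k < 13828),
        if_neg (by omega : ¬ ((13828:Int) ≤ k)),
        if_pos (by omega : (13550:Int) ≤ k)]
    simp only [Option.isSome_some, Option.getD_some, if_true]
  by_cases c15 : k = 13828
  · subst c15
    rw [if_pos (by omega : (13828:Int) ≤ 13828),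
        PySem.Dict.contains_eq_isSome_get?, PySem.Dict.getD_eq_get?_getD,
        PySem.Dict.get?_insert, if_pos rfl]
    simp only [Option.isSome_some, Option.getD_some, if_true]
    norm_num
  · -- k > 13828: cache miss, linear extrapolation past the rampup
    rw [if_pos (by omega : (13828:Int) ≤ k),
        PySem.Dict.contains_eq_isSome_get?, PySem.Dict.get?_insert,
        if_neg c15, pvG,
        if_neg (by omega : ¬ ((0:Int) ≤ k ∧ k < 4167)),
        if_neg (by omega : ¬ ((4167:Int) ≤ k ∧ k < 6251)),
        if_neg (by omega : ¬ ((6251:Int) ≤ k ∧ k < 7640)),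
        if_neg (by omega : ¬ ((7640:Int) ≤ k ∧ k < 8682)),
        if_neg (by omega : ¬ ((8682:Int) ≤ k ∧ k < 9515)),
        if_neg (by omega : ¬ ((9515:Int) ≤ k ∧ k < 10210)),
        if_neg (by omega : ¬ ((10210:Int) ≤ k ∧ k < 10805)),
        if_neg (by omega : ¬ ((10805:Int) ≤ k ∧ k < 11326)),
        if_neg (by omega : ¬ ((11326:Int) ≤ k ∧ k < 11789)),
        if_neg (by omega : ¬ ((11789:Int) ≤ k ∧ k < 12206)),
        if_neg (by omega : ¬ ((12206:Int) ≤ k ∧ k < 12585)),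
        if_neg (by omega : ¬ ((12585:Int) ≤ k ∧ k < 12932)),
        if_neg (by omega : ¬ ((12932:Int) ≤ k ∧ k < 13252)),
        if_neg (by omega : ¬ ((13252:Int) ≤ k ∧ k < 13550)),
        if_neg (by omega : ¬ ((13550:Int) ≤ k ∧ k < 13828))]
    simp only [Option.isSome_none, Bool.false_eq_true, if_false]
    rw [PySem.Dict.getD_insert, if_pos rfl]
    ring
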